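-- pv_equiv track=rewrite | github.com/volcengine/verl | atropos/environments/intern_bootcamp/internbootcamp_lib/internbootcamp/bootcamp/btheworldisjustaprogrammingtaskhardversion/btheworldisjustaprogrammingtaskhardversion.py | calculate_real_beauty
-- ===== SOURCE A (Python) =====
-- def compute_min_balance_and_count(s):
--     balance = 0
--     min_balance = 0
--     count = 0
--     prefix = []
--     for c in s:
--         balance += 1 if c == '(' else -1
--         prefix.append(balance)
--         if balance < min_balance:
--             min_balance = balance
--             count = 1
--         elif balance == min_balance:
--             count += 1
--     return min_balance, count, prefix
--
-- def calculate_real_beauty(s):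
--     total = sum(1 if c == '(' else -1 for c in s)
--     if total != 0:
--         return 0
--     min_balance, count, prefix = compute_min_balance_and_count(s)
--     overall_min = min(prefix)
--     if overall_min < 0:
--         return 0
--     return count
-- ===== SOURCE B (Python) =====
-- def calculate_real_beauty(s):
--     bal = 0
--     neg = False
--     zeros = 0
--     for c in s:
--         bal += 1 if c == '(' else -1
--         if bal < 0:
--             neg = True
--         if bal == 0:
--             zeros += 1
--     return zeros if bal == 0 and not neg else 0
-- ===== Notes on version B (the rewrite author's own statement) =====
-- stated objective: simpler
-- what changed: Single pass keeping only (balance, below-zero flag, zero-position counter) instead of the helper that builds a prefix list with coupled min_balance/count reset logic plus a separate sum pass and a min() over the prefix list.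
import Mathlib
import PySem

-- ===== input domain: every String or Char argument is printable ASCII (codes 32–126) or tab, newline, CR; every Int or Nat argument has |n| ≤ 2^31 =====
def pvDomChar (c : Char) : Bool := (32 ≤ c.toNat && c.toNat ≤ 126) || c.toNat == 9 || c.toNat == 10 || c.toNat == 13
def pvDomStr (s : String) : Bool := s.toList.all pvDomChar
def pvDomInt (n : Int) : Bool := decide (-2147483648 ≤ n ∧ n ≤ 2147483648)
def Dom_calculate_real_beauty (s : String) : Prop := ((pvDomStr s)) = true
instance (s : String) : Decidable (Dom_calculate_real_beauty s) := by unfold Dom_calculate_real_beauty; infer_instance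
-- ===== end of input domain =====

-- B replaces A's helper (prefix list + coupled min_balance/count reset) and the extra sum/min passes by a
-- single pass keeping only (balance, below-zero flag, zero-position counter): simpler, O(1) space.

-- ===== PORT A =====
-- one step of the helper's loop: state (balance, min_balance, count, prefix)
def pvStepA (st : Int × Int × Int × List Int) (c : Char) : Int × Int × Int × List Int :=
  let balance := st.1 + (if c = '(' then (1:Int) else -1)
  let pfx := st.2.2.2 ++ [balance]
  if balance < st.2.1 then (balance, balance, 1, pfx)
  else if balance = st.2.1 then (balance, st.2.1, st.2.2.1 + 1, pfx)
  else (balance, st.2.1, st.2.2.1, pfx)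

def pvFoldA (l : List Char) : Int × Int × Int × List Int :=
  l.foldl pvStepA (0, 0, 0, [])

def compute_min_balance_and_count (s : List Char) : Int × Int × List Int :=
  let r := pvFoldA s
  (r.2.1, r.2.2.1, r.2.2.2)

def calculate_real_beauty (s : String) : Int :=
  let total := (s.toList.map (fun c => if c = '(' then (1:Int) else -1)).sum
  if total ≠ 0 then 0
  else
    let r := compute_min_balance_and_count s.toList
    match PySem.List.min? r.2.2 (fun x => x) with
    | none => 0   -- Python: min([]) raises ValueError here; excluded by Pre_
    | some overall_min => if overall_min < 0 then 0 else r.2.1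

-- ===== PORT B =====
def pvStepB (st : Int × Bool × Int) (c : Char) : Int × Bool × Int :=
  let bal := st.1 + (if c = '(' then (1:Int) else -1)
  (bal, st.2.1 || decide (bal < 0), st.2.2 + (if bal = 0 then 1 else 0))

def pvFoldB (l : List Char) : Int × Bool × Int :=
  l.foldl pvStepB (0, false, 0)

def calculate_real_beauty_alt (s : String) : Int :=
  let st := pvFoldB s.toList
  if st.1 = 0 ∧ st.2.1 = false then st.2.2 else 0

-- ===== PRECONDITION & SPEC =====
-- Pre_ excludes only the empty string, on which A raises ValueError (min of the empty prefix list).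
def Pre_calculate_real_beauty (s : String) : Prop := s ≠ ""
instance (s : String) : Decidable (Pre_calculate_real_beauty s) := by unfold Pre_calculate_real_beauty; infer_instance
def pvWitness_calculate_real_beauty : String := "()"

def Spec_calculate_real_beauty (s : String) (out : Int) : Prop := out = calculate_real_beauty_alt s
instance (s : String) (out : Int) : Decidable (Spec_calculate_real_beauty s out) := by unfold Spec_calculate_real_beauty; infer_instance

-- ===== CLAIM (what is proved, stated in full; the proofs are below) =====
def Claim_equal_calculate_real_beauty : Prop := ∀ (s : String), Dom_calculate_real_beauty s → Pre_calculate_real_beauty s → Spec_calculate_real_beauty s (calculate_real_beauty s)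

-- ===== LEMMAS AND PROOFS =====

lemma pvFoldA_append (t : List Char) (c : Char) : pvFoldA (t ++ [c]) = pvStepA (pvFoldA t) c := by
  simp [pvFoldA, List.foldl_append]

lemma pvFoldB_append (t : List Char) (c : Char) : pvFoldB (t ++ [c]) = pvStepB (pvFoldB t) c := by
  simp [pvFoldB, List.foldl_append]

lemma foldl_min_le_init (l : List Int) (a : Int) : l.foldl min a ≤ a := by
  induction l generalizing a with
  | nil => exact le_refl _
  | cons y t ih => exact le_trans (ih (min a y)) (min_le_left _ _)

lemma foldl_min_le {l : List Int} {a x : Int} (hx : x ∈ l) : l.foldl min a ≤ x := by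
  induction l generalizing a with
  | nil => cases hx
  | cons y t ih =>
    rcases List.mem_cons.mp hx with rfl | h
    · exact le_trans (foldl_min_le_init t (min a x)) (min_le_right _ _)
    · exact ih h

lemma foldl_min_lb {l : List Int} {a v : Int} (h : ∀ x ∈ l, v ≤ x) (ha : v ≤ a) :
    v ≤ l.foldl min a := by
  induction l generalizing a with
  | nil => exact ha
  | cons y t ih =>
    exact ih (fun x hx => h x (List.mem_cons_of_mem _ hx))
      (le_min ha (h y (List.mem_cons_self)))

-- the joint loop invariant linking A's fold state and B's fold state
lemma pvInv (l : List Char) :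
    (pvFoldB l).1 = (pvFoldA l).1 ∧
    (pvFoldA l).2.1 = (pvFoldA l).2.2.2.foldl min 0 ∧
    (pvFoldA l).2.2.1 = (pvFoldA l).2.2.2.count (pvFoldA l).2.1 ∧
    (pvFoldB l).2.1 = decide ((pvFoldA l).2.1 < 0) ∧
    (pvFoldB l).2.2 = (pvFoldA l).2.2.2.count 0 ∧
    (pvFoldA l).1 = (l.map (fun c => if c = '(' then (1:Int) else -1)).sum ∧
    (pvFoldA l).2.2.2.length = l.length := by
  induction l using List.reverseRecOn with
  | nil => simp [pvFoldA, pvFoldB]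
  | append_singleton t c ih =>
    rw [pvFoldA_append, pvFoldB_append]
    rcases hA : pvFoldA t with ⟨b, mb, cnt, pre⟩
    rcases hB : pvFoldB t with ⟨bb, neg, z⟩
    rw [hA, hB] at ih
    obtain ⟨h1, h2, h3, h4, h5, h6, h7⟩ := ih
    simp only at h1 h2 h3 h4 h5 h6 h7
    subst h1
    have hge : ∀ x ∈ pre, mb ≤ x := by
      intro x hx; rw [h2]; exact foldl_min_le hx
    simp only [pvStepA, pvStepB, List.map_append, List.map_cons, List.map_nil,
      List.sum_append, List.sum_cons, List.sum_nil, add_zero]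
    set d := (if c = '(' then (1:Int) else -1) with hd
    set b' := bb + d with hb'
    by_cases hlt : b' < mb
    · have hcz : pre.count b' = 0 := by
        rw [List.count_eq_zero]
        intro hmem
        exact absurd (hge _ hmem) (by omega)
      simp only [if_pos hlt]
      refine ⟨trivial, ?_, ?_, ?_, ?_, by omega, by simp [h7]⟩
      · rw [List.foldl_append, ← h2]; simp; omega
      · simp [List.count_append, hcz]
      · simp only [h4]
        by_cases h : mb < 0 <;> simp [h] <;> omega
      · by_cases hz : b' = 0 <;>
          simp [List.count_append, List.count_nil, h5, hz]
    · by_cases heq : b' = mb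
      · simp only [if_neg hlt, if_pos heq]
        refine ⟨trivial, ?_, ?_, ?_, ?_, by omega, by simp [h7]⟩
        · rw [List.foldl_append, ← h2]; simp; omega
        · simp [List.count_append, h3, heq]
        · simp only [h4]; rw [heq]; simp
        · by_cases hz : b' = 0 <;>
            simp [List.count_append, List.count_nil, h5, hz]
      · simp only [if_neg hlt, if_neg heq]
        refine ⟨trivial, ?_, ?_, ?_, ?_, by omega, by simp [h7]⟩
        · rw [List.foldl_append, ← h2]; simp; omega
        · simp [List.count_append, h3, heq]
        · simp only [h4]
          by_cases h : mb < 0 <;> simp [h] <;> omega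
        · by_cases hz : b' = 0 <;>
            simp [List.count_append, List.count_nil, h5, hz]

-- ===== VERDICT (by name: the statement is the Claim_ definition above) =====
theorem calculate_real_beauty_spec : Claim_equal_calculate_real_beauty := by
  intro s _ hpre
  unfold Spec_calculate_real_beauty calculate_real_beauty calculate_real_beauty_alt
    compute_min_balance_and_count
  obtain ⟨h1, h2, h3, h4, h5, h6, h7⟩ := pvInv s.toList
  have hne : s.toList ≠ [] := by
    intro h
    apply hpre
    exact String.toList_eq_nil_iff.mp h
  simp only
  by_cases ht : (s.toList.map (fun c => if c = '(' then (1:Int) else -1)).sum ≠ 0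
  · simp only [if_pos ht]
    rw [if_neg]
    intro hcon
    exact ht (by rw [← h6, ← h1, hcon.1])
  · simp only [ne_eq, not_not] at ht
    simp only [ht, ne_eq, not_true_eq_false, if_false]
    have hpre_ne : (pvFoldA s.toList).2.2.2 ≠ [] := by
      intro h
      apply hne
      have := h7
      rw [h] at this
      exact List.length_eq_zero_iff.mp this.symm
    rcases hm : PySem.List.min? (pvFoldA s.toList).2.2.2 (fun x => x) with _ | m
    · exact absurd ((PySem.List.min?_eq_none_iff _ _).mp hm) hpre_ne
    · have hmem : m ∈ (pvFoldA s.toList).2.2.2 := PySem.List.min?_mem hm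
      have hmin : ∀ y ∈ (pvFoldA s.toList).2.2.2, m ≤ y := fun y hy => PySem.List.min?_isMin hm y hy
      have hmb_le_m : (pvFoldA s.toList).2.1 ≤ m := by rw [h2]; exact foldl_min_le hmem
      have hmb_le_0 : (pvFoldA s.toList).2.1 ≤ 0 := by rw [h2]; exact foldl_min_le_init _ _
      have hmb_ge : min 0 m ≤ (pvFoldA s.toList).2.1 := by
        rw [h2]
        exact foldl_min_lb (fun x hx => le_trans (min_le_right _ _) (hmin x hx)) (min_le_left _ _)
      by_cases hm0 : m < 0
      · -- A returns 0; B's neg flag is set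
        have hmb_neg : (pvFoldA s.toList).2.1 < 0 := by omega
        simp only [if_pos hm0]
        rw [if_neg]
        intro hcon
        have := hcon.2
        rw [h4] at this
        simp [hmb_neg] at this
      · -- overall min ≥ 0: min_balance = 0, count = zero-count
        have hmb0 : (pvFoldA s.toList).2.1 = 0 := by
          have : min 0 m = 0 := by omega
          omega
        simp only [if_neg hm0]
        rw [if_pos]
        · rw [h3, hmb0, h5]
        · constructor
          · rw [h1, h6, ht]
          · rw [h4, hmb0]
            simp
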